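-- pv_equiv track=rewrite | github.com/vinhnd2010/tao-tensorlaw | lib/model.py | sort_dedupe
-- ===== SOURCE A (Python) =====
-- def sort_dedupe(data):
--     """Sort by timestamp, deduplicate by day bucket."""
--     data.sort(key=lambda x: x[0])
--     seen = set()
--     out = []
--     for point in data:
--         day_key = int(point[0] // 86400)
--         if day_key not in seen:
--             seen.add(day_key)
--             out.append(point)
--     return out
-- ===== SOURCE B (Python) =====
-- def sort_dedupe(data):
--     """Sort by timestamp, dedupe by day bucket.
--
--     Sorts `data` in place like the original, then repeatedly selects the
--     earliest remaining point and filters out its whole day bucket; no seen-set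
--     single pass.
--     """
--     data.sort(key=lambda x: x[0])
--     out = []
--     rest = data
--     while rest:
--         first = rest[0]
--         out.append(first)
--         day = first[0] // 86400
--         rest = [p for p in rest if p[0] // 86400 != day]
--     return out
-- ===== Notes on version B (the rewrite author's own statement) =====
-- stated objective: alternative
-- what changed: Replaces the single-pass seen-set scan with repeated selection: after the same in-place sort, take the earliest remaining point, then filter out its entire day bucket and recurse on the remainder (one filtering pass per distinct day).
import Mathlib
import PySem

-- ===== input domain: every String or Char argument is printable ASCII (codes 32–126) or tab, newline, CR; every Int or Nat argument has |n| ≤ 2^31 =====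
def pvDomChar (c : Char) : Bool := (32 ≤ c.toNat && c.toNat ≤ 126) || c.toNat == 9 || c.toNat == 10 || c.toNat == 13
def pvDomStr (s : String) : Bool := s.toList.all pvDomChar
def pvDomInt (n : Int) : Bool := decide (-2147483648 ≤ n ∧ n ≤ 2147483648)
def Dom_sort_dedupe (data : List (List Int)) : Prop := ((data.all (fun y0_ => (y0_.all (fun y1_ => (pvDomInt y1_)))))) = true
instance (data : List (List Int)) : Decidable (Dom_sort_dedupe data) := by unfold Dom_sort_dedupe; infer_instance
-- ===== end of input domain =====

-- B replaces A's seen-set single pass by repeated selection after the same sort: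
-- take the earliest remaining point, filter out its whole day bucket, recurse;
-- objective: alternative. Both Pythons sort `data` in place (same mutation); the
-- equivalence proved here is about the return value.


-- ===== PORT A =====
-- point[0]: under Pre_ every inner list is nonempty, so headD 0 is exactly x[0].
def sort_dedupe (data : List (List Int)) : List (List Int) :=
  let srt := PySem.List.sorted data (fun x => x.headD 0) false
  (srt.foldl
    (fun (st : PySem.Set Int × List (List Int)) point =>
      let dayKey := PySem.Int.floordiv (point.headD 0) 86400
      if PySem.Set.contains st.1 dayKey then st
      else (PySem.Set.add st.1 dayKey, st.2 ++ [point]))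
    (PySem.Set.empty, [])).2

-- ===== PORT B =====
-- the while loop of Source B: pick the head, drop its whole day bucket, repeat
def filterGo : List (List Int) → List (List Int)
  | [] => []
  | first :: rest =>
    let day := PySem.Int.floordiv (first.headD 0) 86400
    first :: filterGo ((first :: rest).filter
      (fun p => PySem.Int.floordiv (p.headD 0) 86400 != day))
termination_by l => l.length
decreasing_by
  simp only [List.filter_cons, bne_self_eq_false, Bool.false_eq_true, if_false]
  exact Nat.lt_succ_of_le (List.length_filter_le _ _)

def sort_dedupe_alt (data : List (List Int)) : List (List Int) :=
  filterGo (PySem.List.sorted data (fun x => x.headD 0) false)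

-- ===== PRECONDITION & SPEC =====
-- Pre_ excludes inputs containing an empty inner list, on which both Pythons raise IndexError (point[0]).
def Pre_sort_dedupe (data : List (List Int)) : Prop := ∀ x ∈ data, x ≠ []
instance (data : List (List Int)) : Decidable (Pre_sort_dedupe data) := by unfold Pre_sort_dedupe; infer_instance
def pvWitness_sort_dedupe : List (List Int) := [[172805, 1], [3, 2], [172801, 5], [90000]]

def Spec_sort_dedupe (data : List (List Int)) (out : List (List Int)) : Prop := out = sort_dedupe_alt data
instance (data : List (List Int)) (out : List (List Int)) : Decidable (Spec_sort_dedupe data out) := by unfold Spec_sort_dedupe; infer_instance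

-- ===== CLAIM (what is proved, stated in full; the proofs are below) =====
def Claim_equal_sort_dedupe : Prop := ∀ (data : List (List Int)), Dom_sort_dedupe data → Pre_sort_dedupe data → Spec_sort_dedupe data (sort_dedupe data)

-- ===== LEMMAS AND PROOFS =====

-- the day bucket of a point
def pvDay (x : List Int) : Int := PySem.Int.floordiv (x.headD 0) 86400

-- A adjacent-scan intermediate form, used only in the proofs below
def sortDedupeGo (prev : Option Int) : List (List Int) → List (List Int)
  | [] => []
  | point :: rest =>
    let day := PySem.Int.floordiv (point.headD 0) 86400
    if some day == prev then sortDedupeGo prev rest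
    else point :: sortDedupeGo (some day) rest

-- Core lemma: on a list whose day keys are nondecreasing, A's seen-set fold and
-- the previous-day scan produce the same output, under the stated invariant
-- linking the set `s` to the previous kept day `prev`.
theorem foldl_eq_go (l : List (List Int))
    (hmono : l.Pairwise (fun a b => pvDay a ≤ pvDay b)) :
    ∀ (s : PySem.Set Int) (acc : List (List Int)) (prev : Option Int),
    (match prev with
     | none => s = []
     | some p => p ∈ s ∧ (∀ q ∈ s, q ≤ p) ∧ (∀ y ∈ l, p ≤ pvDay y)) →
    (l.foldl
      (fun (st : PySem.Set Int × List (List Int)) point =>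
        let dayKey := PySem.Int.floordiv (point.headD 0) 86400
        if PySem.Set.contains st.1 dayKey then st
        else (PySem.Set.add st.1 dayKey, st.2 ++ [point]))
      (s, acc)).2 = acc ++ sortDedupeGo prev l := by
  induction l with
  | nil => intro s acc prev _; simp [sortDedupeGo]
  | cons x rest ih =>
    intro s acc prev hinv
    have hmono' := (List.pairwise_cons.mp hmono).2
    have hhead := (List.pairwise_cons.mp hmono).1
    cases prev with
    | none =>
      subst hinv
      have hc : PySem.Set.contains ([] : PySem.Set Int) (pvDay x) = false := rfl
      simp only [List.foldl_cons, sortDedupeGo, pvDay] at hc ⊢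
      rw [hc]
      simp only [Bool.false_eq_true, if_false, Option.some_beq_none]
      rw [ih hmono' (PySem.Set.add [] (PySem.Int.floordiv (x.headD 0) 86400)) (acc ++ [x])
        (some (PySem.Int.floordiv (x.headD 0) 86400))
        ⟨by
          exact (PySem.Set.mem_add [] _ _).mpr (Or.inr rfl),
         fun q hq => by
          rcases (PySem.Set.mem_add [] _ q).mp hq with h | h
          · simp at h
          · exact le_of_eq h,
         hhead⟩]
      simp
    | some p =>
      obtain ⟨hps, hle, hge⟩ := hinv
      by_cases hd : pvDay x = p
      · -- same day as previously kept: both skip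
        have hc : PySem.Set.contains s (pvDay x) = true := by
          simp [PySem.Set.contains]; rw [hd]; exact hps
        simp only [List.foldl_cons, sortDedupeGo, pvDay] at hc hd ⊢
        rw [hc, hd]
        simp only [beq_self_eq_true, if_pos]
        exact ih hmono' s acc (some p) ⟨hps, hle, fun y hy => hge y (List.mem_cons_of_mem _ hy)⟩
      · -- new day: p < day x, so day x is not in the seen set; both keep x
        have hplt : p < pvDay x := lt_of_le_of_ne (hge x (List.mem_cons_self)) (Ne.symm hd)
        have hc : PySem.Set.contains s (pvDay x) = false := by
          simp [PySem.Set.contains]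
          intro h
          exact absurd (hle _ h) (not_le.mpr hplt)
        have hbeq : (some (pvDay x) == some p) = false := by simp [hd]
        simp only [List.foldl_cons, sortDedupeGo, pvDay] at hc hbeq ⊢
        rw [hc, hbeq]
        simp only [Bool.false_eq_true, if_false]
        rw [ih hmono' (PySem.Set.add s (PySem.Int.floordiv (x.headD 0) 86400)) (acc ++ [x])
          (some (PySem.Int.floordiv (x.headD 0) 86400))
          ⟨(PySem.Set.mem_add s _ _).mpr (Or.inr rfl),
           fun q hq => by
             rcases (PySem.Set.mem_add s _ q).mp hq with h | h
             · exact le_of_lt (lt_of_le_of_lt (hle q h) (by simpa [pvDay] using hplt))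
             · exact le_of_eq h,
           hhead⟩]
        simp

theorem sorted_days_mono (data : List (List Int)) :
    (PySem.List.sorted data (fun x => x.headD 0) false).Pairwise
      (fun a b => pvDay a ≤ pvDay b) := by
  have h := PySem.List.sorted_pairwise (xs := data) (key := fun x => x.headD 0)
  exact h.imp (fun {a b} hab => by
    unfold pvDay
    have h4 : (0:Int) < 86400 := by norm_num
    rw [PySem.Int.floordiv_eq_ediv_of_pos h4, PySem.Int.floordiv_eq_ediv_of_pos h4]
    exact Int.ediv_le_ediv h4 hab)

-- Skipping a day on the adjacent scan is filtering that day out, when all days are ≥ d.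
theorem go_skip_filter (d : Int) :
    ∀ (l : List (List Int)), l.Pairwise (fun a b => pvDay a ≤ pvDay b) →
    (∀ y ∈ l, d ≤ pvDay y) →
    sortDedupeGo (some d) l
      = sortDedupeGo none (l.filter (fun p => PySem.Int.floordiv (p.headD 0) 86400 != d)) := by
  intro l
  induction l with
  | nil => intro _ _; rfl
  | cons y rest ih =>
    intro hmono hge
    have hmono' := (List.pairwise_cons.mp hmono).2
    have hhead := (List.pairwise_cons.mp hmono).1
    by_cases hd : pvDay y = d
    · have hb : (PySem.Int.floordiv (y.headD 0) 86400 != d) = false := by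
        simp [pvDay] at hd; simp [hd]
      simp only [sortDedupeGo, List.filter_cons, hb, Bool.false_eq_true, if_false]
      have : (some (PySem.Int.floordiv (y.headD 0) 86400) == some d) = true := by
        simp [pvDay] at hd; simp [hd]
      rw [this]
      simp only [if_pos]
      exact ih hmono' (fun z hz => hge z (List.mem_cons_of_mem _ hz))
    · have hdlt : d < pvDay y := lt_of_le_of_ne (hge y List.mem_cons_self) (Ne.symm hd)
      have hb : (PySem.Int.floordiv (y.headD 0) 86400 != d) = true := by
        simp [pvDay] at hd; simp [hd]
      have hbeq : (some (PySem.Int.floordiv (y.headD 0) 86400) == some d) = false := by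
        simp [pvDay] at hd; simp [hd]
      simp only [sortDedupeGo, List.filter_cons, hb, if_pos, hbeq, Bool.false_eq_true, if_false]
      -- the rest contains nothing of day d anymore: filter keeps everything
      have hkeep : rest.filter (fun p => PySem.Int.floordiv (p.headD 0) 86400 != d) = rest := by
        apply List.filter_eq_self.mpr
        intro z hz
        have h1 : pvDay y ≤ pvDay z := hhead z hz
        have h2 : pvDay z ≠ d := ne_of_gt (lt_of_lt_of_le hdlt h1)
        simp [pvDay] at h2
        simp [h2]
      rw [hkeep]
      rfl

-- B's repeated-filter recursion equals the adjacent scan on day-monotone lists.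
theorem filterGo_eq_go :
    ∀ (n : ℕ) (l : List (List Int)), l.length ≤ n →
    l.Pairwise (fun a b => pvDay a ≤ pvDay b) →
    filterGo l = sortDedupeGo none l := by
  intro n
  induction n with
  | zero =>
    intro l hl _
    have : l = [] := List.eq_nil_of_length_eq_zero (Nat.le_zero.mp hl)
    subst this; simp [filterGo, sortDedupeGo]
  | succ n ih =>
    intro l hl hmono
    cases l with
    | nil => simp [filterGo, sortDedupeGo]
    | cons x rest =>
      have hmono' := (List.pairwise_cons.mp hmono).2
      have hhead := (List.pairwise_cons.mp hmono).1
      have hfx : ((x :: rest).filter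
          (fun p => PySem.Int.floordiv (p.headD 0) 86400
            != PySem.Int.floordiv (x.headD 0) 86400))
          = rest.filter (fun p => PySem.Int.floordiv (p.headD 0) 86400
            != PySem.Int.floordiv (x.headD 0) 86400) := by
        simp
      rw [filterGo, hfx]
      have hsub : (rest.filter (fun p => PySem.Int.floordiv (p.headD 0) 86400
          != PySem.Int.floordiv (x.headD 0) 86400)).Pairwise
          (fun a b => pvDay a ≤ pvDay b) :=
        hmono'.sublist List.filter_sublist
      have hlen : (rest.filter (fun p => PySem.Int.floordiv (p.headD 0) 86400
          != PySem.Int.floordiv (x.headD 0) 86400)).length ≤ n :=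
        le_trans (List.length_filter_le _ _) (Nat.lt_succ_iff.mp (Nat.lt_of_lt_of_le (Nat.lt_succ_of_le (Nat.le_refl _)) hl))
      rw [ih _ hlen hsub]
      rw [← go_skip_filter (PySem.Int.floordiv (x.headD 0) 86400) rest hmono'
        (fun y hy => by simpa [pvDay] using hhead y hy)]
      simp [sortDedupeGo]

-- ===== VERDICT (by name: the statement is the Claim_ definition above) =====
theorem sort_dedupe_spec : Claim_equal_sort_dedupe := by
  intro data _ _
  unfold Spec_sort_dedupe sort_dedupe sort_dedupe_alt
  rw [filterGo_eq_go (PySem.List.sorted data (fun x => x.headD 0) false).length _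
    (Nat.le_refl _) (sorted_days_mono data)]
  simpa using foldl_eq_go _ (sorted_days_mono data) PySem.Set.empty [] none rfl
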